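-- pv_equiv track=rewrite | github.com/mikhalexandr/itmo-cse-informatics | lab5/src/output/console.py | get_column_widths
-- ===== SOURCE A (Python) =====
-- def get_column_widths(cols):
--     col_widths = []
--     for c in range(cols):
--         if c == 1:
--             col_widths.append(15)
--         elif c == 2:
--             col_widths.append(10)
--         elif c == 3:
--             col_widths.append(3)
--         elif c < 5:
--             col_widths.append(7)
--         else:
--             col_widths.append(3)
--     return col_widths
-- ===== SOURCE B (Python) =====
-- def get_column_widths(cols):
--     base = [7, 15, 10, 3, 7]
--     n = max(cols, 0)
--     return base[:n] + [3] * (n - 5)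
-- ===== Notes on version B (the rewrite author's own statement) =====
-- stated objective: simpler
-- what changed: Replaces the per-index loop with an if/elif chain by slicing a literal base list [7,15,10,3,7] and appending [3]*(n-5) as the constant tail (list repetition replaces the interpreted loop).
import Mathlib
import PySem

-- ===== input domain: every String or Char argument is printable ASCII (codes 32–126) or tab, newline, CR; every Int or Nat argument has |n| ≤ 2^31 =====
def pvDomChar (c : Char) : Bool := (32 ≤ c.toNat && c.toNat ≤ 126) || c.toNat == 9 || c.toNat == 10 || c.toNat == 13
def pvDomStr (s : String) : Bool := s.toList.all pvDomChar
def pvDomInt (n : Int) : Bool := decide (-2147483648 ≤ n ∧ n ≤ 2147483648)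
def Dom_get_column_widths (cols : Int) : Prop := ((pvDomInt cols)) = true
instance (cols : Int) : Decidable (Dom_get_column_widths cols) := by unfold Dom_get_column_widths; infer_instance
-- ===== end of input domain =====

-- B replaces A's per-index if/elif loop by slicing a literal base list and appending a constant tail (objective: simpler).

-- ===== PORT A =====
def get_column_widths (cols : Int) : List Int :=
  (PySem.List.pyRange 0 cols 1).foldl
    (fun col_widths c =>
      if c == 1 then col_widths ++ [15]
      else if c == 2 then col_widths ++ [10]
      else if c == 3 then col_widths ++ [3]
      else if c < 5 then col_widths ++ [7]
      else col_widths ++ [3]) []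

-- ===== PORT B =====
def get_column_widths_alt (cols : Int) : List Int :=
  let base : List Int := [7, 15, 10, 3, 7]
  let n : Nat := (max cols 0).toNat
  base.take n ++ List.replicate (n - 5) 3

-- ===== PRECONDITION & SPEC =====
def Spec_get_column_widths (cols : Int) (out : List Int) : Prop := out = get_column_widths_alt cols
instance (cols : Int) (out : List Int) : Decidable (Spec_get_column_widths cols out) := by unfold Spec_get_column_widths; infer_instance

-- ===== CLAIM (what is proved, stated in full; the proofs are below) =====
def Claim_equal_get_column_widths : Prop := ∀ (cols : Int), Dom_get_column_widths cols → Spec_get_column_widths cols (get_column_widths cols)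

-- ===== LEMMAS AND PROOFS =====

def pvWidth (c : Int) : Int :=
  if c == 1 then 15 else if c == 2 then 10 else if c == 3 then 3 else if c < 5 then 7 else 3

theorem pvWidth_range : ∀ n : Nat,
    (List.range n).map (fun k : Nat => pvWidth (Int.ofNat k)) =
      ([7, 15, 10, 3, 7] : List Int).take n ++ List.replicate (n - 5) 3 := by
  intro n
  induction n with
  | zero => decide
  | succ m ih =>
    simp only [Int.ofNat_eq_natCast] at ih ⊢
    rw [List.range_succ, List.map_append, ih]
    by_cases h : m < 5
    · interval_cases m <;> decide
    · have h5 : ¬ (((m : Int)) < 5) := by omega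
      have : pvWidth ((m : Int)) = 3 := by
        simp only [pvWidth, if_neg h5]
        have h1 : ((m : Int) == 1) = false := by simp; omega
        have h2 : ((m : Int) == 2) = false := by simp; omega
        have h3 : ((m : Int) == 3) = false := by simp; omega
        simp [h1, h2, h3]
      have htake : ([7, 15, 10, 3, 7] : List Int).take (m + 1) = ([7, 15, 10, 3, 7] : List Int).take m := by
        rw [List.take_of_length_le (by simp; omega), List.take_of_length_le (by simp; omega)]
      have hrep : List.replicate (m + 1 - 5) (3 : Int) = List.replicate (m - 5) 3 ++ [3] := by
        have : m + 1 - 5 = (m - 5) + 1 := by omega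
        rw [this, List.replicate_succ']
      rw [List.map_singleton, this, htake, hrep, List.append_assoc]

theorem get_column_widths_eq (cols : Int) : get_column_widths cols = get_column_widths_alt cols := by
  unfold get_column_widths get_column_widths_alt
  have hfold : ∀ (l : List Int) (acc : List Int),
      l.foldl (fun col_widths c =>
        if c == 1 then col_widths ++ [15]
        else if c == 2 then col_widths ++ [10]
        else if c == 3 then col_widths ++ [3]
        else if c < 5 then col_widths ++ [7]
        else col_widths ++ [3]) acc
      = l.foldl (fun col_widths c => col_widths ++ [pvWidth c]) acc := by
    intro l
    induction l with
    | nil => intro acc; rfl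
    | cons x xs ih =>
      intro acc
      simp only [List.foldl_cons, ih]
      congr 1
      simp only [pvWidth]
      split_ifs <;> rfl
  rw [hfold, PySem.List.foldl_append_singleton_eq_map, List.nil_append,
      PySem.List.pyRange_one, Int.sub_zero]
  rw [List.map_map]
  have hm : (pvWidth ∘ fun k : Nat => (0 : Int) + k) = fun k : Nat => pvWidth (Int.ofNat k) := by
    funext k; simp
  rw [hm, pvWidth_range]
  congr 2 <;> omega

-- ===== VERDICT (by name: the statement is the Claim_ definition above) =====
theorem get_column_widths_spec : Claim_equal_get_column_widths := by
  intro cols _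
  exact get_column_widths_eq cols
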